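-- pv_equiv track=rewrite | github.com/harivc69/Dementify-Backend | hierarchical_model_package/hierarchical_classifier.py | _get_feature_description
-- ===== SOURCE A (Python) =====
-- def _get_feature_description(name: str) -> str:
--     """Get human-readable description for a feature."""
--     prefixes = {
--         'his_': 'Medical History',
--         'med_': 'Medication',
--         'ph_': 'Physical Measurement',
--         'bat_': 'Cognitive Test',
--         'exam_': 'Neurological Exam',
--         'cvd_': 'Cardiovascular',
--         'updrs_': 'UPDRS Score',
--         'npiq_': 'Neuropsychiatric',
--         'gds_': 'Depression Scale',
--         'faq_': 'Functional Assessment'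
--     }
--
--     for prefix, category in prefixes.items():
--         if name.startswith(prefix):
--             return f"{category}: {name[len(prefix):]}"
--     return name
-- ===== SOURCE B (Python) =====
-- def _get_feature_description(name: str) -> str:
--     """Get human-readable description for a feature."""
--     prefixes = {
--         'his_': 'Medical History',
--         'med_': 'Medication',
--         'ph_': 'Physical Measurement',
--         'bat_': 'Cognitive Test',
--         'exam_': 'Neurological Exam',
--         'cvd_': 'Cardiovascular',
--         'updrs_': 'UPDRS Score',
--         'npiq_': 'Neuropsychiatric',
--         'gds_': 'Depression Scale',
--         'faq_': 'Functional Assessment'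
--     }
--     head, sep, rest = name.partition('_')
--     category = prefixes.get(head + sep)
--     if category is None:
--         return name
--     return f"{category}: {rest}"
-- ===== Notes on version B (the rewrite author's own statement) =====
-- stated objective: idiomatic
-- what changed: Replaces the scan over all ten prefixes with startswith by a single name.partition at the first underscore and one direct dict lookup of the head plus separator.
import Mathlib
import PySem

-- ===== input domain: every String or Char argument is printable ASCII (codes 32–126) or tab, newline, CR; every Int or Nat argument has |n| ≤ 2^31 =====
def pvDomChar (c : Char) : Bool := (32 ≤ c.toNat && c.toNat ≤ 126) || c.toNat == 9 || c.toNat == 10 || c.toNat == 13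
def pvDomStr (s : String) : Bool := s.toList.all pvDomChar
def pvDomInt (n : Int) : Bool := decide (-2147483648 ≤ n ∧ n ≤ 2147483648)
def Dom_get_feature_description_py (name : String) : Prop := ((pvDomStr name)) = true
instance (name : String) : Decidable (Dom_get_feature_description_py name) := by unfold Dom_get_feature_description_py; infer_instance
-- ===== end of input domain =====

-- B replaces A's scan over all ten prefixes (startswith each) by one partition at the first underscore and a single dict lookup; objective: idiomatic.

-- ===== PORT A =====
def pvPrefixesA : PySem.Dict String String := ⟨[
  ("his_", "Medical History"),
  ("med_", "Medication"),
  ("ph_", "Physical Measurement"),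
  ("bat_", "Cognitive Test"),
  ("exam_", "Neurological Exam"),
  ("cvd_", "Cardiovascular"),
  ("updrs_", "UPDRS Score"),
  ("npiq_", "Neuropsychiatric"),
  ("gds_", "Depression Scale"),
  ("faq_", "Functional Assessment")]⟩

-- the 'for prefix, category in prefixes.items(): if name.startswith(prefix): return …' loop
def pvLoopA (name : String) : List (String × String) → String
  | [] => name
  | (pfx, category) :: rest =>
    if PySem.Str.startswith name pfx then
      category ++ ": " ++ PySem.Str.slice name (some (PySem.Str.len pfx)) none
    else pvLoopA name rest

def get_feature_description_py (name : String) : String :=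
  pvLoopA name pvPrefixesA.items

-- ===== PORT B =====
-- hand port of s.partition('_') (no PySem primitive): splits at the FIRST underscore; exact for this one-char separator
def pvPartitionUnderscore (s : String) : String × String × String :=
  match s.toList.dropWhile (fun c => !(c == '_')) with
  | [] => (s, "", "")
  | _ :: r => (String.ofList (s.toList.takeWhile (fun c => !(c == '_'))), "_", String.ofList r)

def pvPrefixesB : PySem.Dict String String := ⟨[
  ("his_", "Medical History"),
  ("med_", "Medication"),
  ("ph_", "Physical Measurement"),
  ("bat_", "Cognitive Test"),
  ("exam_", "Neurological Exam"),
  ("cvd_", "Cardiovascular"),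
  ("updrs_", "UPDRS Score"),
  ("npiq_", "Neuropsychiatric"),
  ("gds_", "Depression Scale"),
  ("faq_", "Functional Assessment")]⟩

def get_feature_description_py_alt (name : String) : String :=
  match pvPartitionUnderscore name with
  | (head, sep, rest) =>
    match PySem.Dict.get? pvPrefixesB (head ++ sep) with
    | none => name
    | some category => category ++ ": " ++ rest

-- ===== PRECONDITION & SPEC =====
def Spec_get_feature_description_py (name : String) (out : String) : Prop := out = get_feature_description_py_alt name
instance (name : String) (out : String) : Decidable (Spec_get_feature_description_py name out) := by unfold Spec_get_feature_description_py; infer_instance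

-- ===== CLAIM (what is proved, stated in full; the proofs are below) =====
def Claim_equal_get_feature_description_py : Prop := ∀ (name : String), Dom_get_feature_description_py name → Spec_get_feature_description_py name (get_feature_description_py name)

-- ===== LEMMAS AND PROOFS =====

-- the lookup key of B: head ++ sep of the partition
def pvKey (name : String) : String :=
  (pvPartitionUnderscore name).1 ++ (pvPartitionUnderscore name).2.1

-- a prefix whose only underscore is last is a prefix of h ++ underscore :: r (underscore-free h) iff its stem equals h
theorem pv_prefix_underscore_iff (pc h : List Char) (r : List Char)
    (hpc : '_' ∉ pc) (hh : '_' ∉ h) :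
    (pc ++ ['_']) <+: (h ++ '_' :: r) ↔ pc = h := by
  constructor
  · induction pc generalizing h with
    | nil =>
      intro hp
      cases h with
      | nil => rfl
      | cons c h' =>
        exfalso
        simp only [List.nil_append, List.cons_append, List.cons_prefix_cons] at hp
        exact hh (by simp [← hp.1])
    | cons a pc' ih =>
      intro hp
      cases h with
      | nil =>
        exfalso
        simp only [List.cons_append, List.nil_append, List.cons_prefix_cons] at hp
        exact hpc (by simp [hp.1])
      | cons c h' =>
        simp only [List.cons_append, List.cons_prefix_cons] at hp
        have h2 := ih (fun hm => hpc (by simp [hm])) (h := h') (fun hm => hh (by simp [hm])) hp.2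
        simp [hp.1, h2]
  · rintro rfl
    exact ⟨r, by simp⟩

-- a prefix containing an underscore cannot be a prefix of an underscore-free string
theorem pv_no_underscore_not_prefix (pc l : List Char) (hl : '_' ∉ l) :
    ¬ (pc ++ ['_']) <+: l := fun hp => hl (hp.subset (by simp))

-- the generic equivalence of A's scan and B's keyed lookup, for any prefix table
-- whose keys each consist of an underscore-free stem followed by an underscore
theorem pv_loop_eq (name : String) (ps : List (String × String))
    (hps : ∀ q ∈ ps, q.1.toList.dropLast ++ ['_'] = q.1.toList ∧ '_' ∉ q.1.toList.dropLast) :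
    pvLoopA name ps =
      match PySem.Dict.get? (⟨ps⟩ : PySem.Dict String String) (pvKey name) with
      | none => name
      | some category => category ++ ": " ++ (pvPartitionUnderscore name).2.2 := by
  induction ps with
  | nil => simp [pvLoopA, PySem.Dict.get?]
  | cons q rest ih =>
    obtain ⟨pfx, category⟩ := q
    obtain ⟨hsplit, hstem⟩ := hps (pfx, category) (by simp)
    set pc := pfx.toList.dropLast with hpc
    have hrest : ∀ q ∈ rest, q.1.toList.dropLast ++ ['_'] = q.1.toList ∧ '_' ∉ q.1.toList.dropLast :=
      fun q hq => hps q (by simp [hq])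
    -- analyse the partition of name
    rcases hu : name.toList.dropWhile (fun c => !(c == '_')) with _ | ⟨u, r⟩
    · -- no '_' in name
      have hnone : '_' ∉ name.toList := by
        intro hm
        have := List.dropWhile_eq_nil_iff.mp hu _ hm
        simp at this
      have hkey : pvKey name = name := by
        simp [pvKey, pvPartitionUnderscore, hu]
      have hsw : PySem.Str.startswith name pfx = false := by
        rw [Bool.eq_false_iff]
        intro hsw
        have := (PySem.Chars.startswith_iff _ _).mp (by simpa [PySem.Str.startswith] using hsw)
        rw [← hsplit] at this
        exact pv_no_underscore_not_prefix _ _ hnone this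
      have hbeq : (pfx == pvKey name) = false := by
        rw [hkey, beq_eq_false_iff_ne]
        intro heq
        apply hnone
        rw [← heq, ← hsplit]
        simp
      simp only [pvLoopA, hsw, Bool.false_eq_true, if_false, ih hrest,
        PySem.Dict.get?, List.find?_cons, hbeq]
    · -- name = h ++ '_' :: r with '_' ∉ h
      have hu2 : u = '_' := by
        have := List.head_dropWhile_not (fun c => !(c == '_')) (l := name.toList) (by simp [hu])
        simpa [hu] using this
      subst hu2
      set h := name.toList.takeWhile (fun c => !(c == '_')) with hh
      have hdecomp : name.toList = h ++ '_' :: r := by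
        rw [hh, ← hu]; exact (List.takeWhile_append_dropWhile).symm
      have hnh : '_' ∉ h := by
        intro hm
        rw [hh] at hm
        have := List.mem_takeWhile_imp hm
        simp at this
      have hkeyl : (pvKey name).toList = h ++ ['_'] := by
        simp [pvKey, pvPartitionUnderscore, hu, hh]
      have hcond : (PySem.Str.startswith name pfx = true) ↔ (pfx == pvKey name) = true := by
        rw [beq_iff_eq, ← String.toList_inj, hkeyl, ← hsplit]
        constructor
        · intro hsw
          have := (PySem.Chars.startswith_iff _ _).mp (by simpa [PySem.Str.startswith] using hsw)
          rw [← hsplit, hdecomp] at this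
          have := (pv_prefix_underscore_iff pc h r hstem hnh).mp this
          rw [this]
        · intro heq
          have hpch : pc = h := by
            simpa using heq
          have : (pc ++ ['_']) <+: name.toList := by
            rw [hdecomp]
            exact (pv_prefix_underscore_iff pc h r hstem hnh).mpr hpch
          rw [hsplit] at this
          simpa [PySem.Str.startswith] using (PySem.Chars.startswith_iff _ _).mpr this
      by_cases hsw : PySem.Str.startswith name pfx = true
      · have hbeq : (pfx == pvKey name) = true := hcond.mp hsw
        simp only [pvLoopA, hsw, if_true, PySem.Dict.get?, List.find?_cons, hbeq]
        -- outputs agree: the slice from len pfx equals the partition's rest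
        have hpch : pc = h := by
          have := (PySem.Chars.startswith_iff _ _).mp (by simpa [PySem.Str.startswith] using hsw)
          rw [← hsplit, hdecomp] at this
          exact (pv_prefix_underscore_iff pc h r hstem hnh).mp this
        rw [← String.toList_inj]
        simp [pvPartitionUnderscore, hu]
        have hl : pfx.length = pc.length + 1 := by
          have h1 : pfx.toList.length = pc.length + 1 := by rw [← hsplit]; simp
          simpa using h1
        rw [hl, hdecomp, ← hpch]
        have h2 : pc ++ '_' :: r = (pc ++ ['_']) ++ r := by simp
        rw [h2]
        have h3 : pc.length + 1 = (pc ++ ['_']).length := by simp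
        rw [h3, List.drop_left]
      · have hbeq : (pfx == pvKey name) = false := by
          rw [Bool.eq_false_iff]; intro hb; exact hsw (hcond.mpr hb)
        rw [Bool.not_eq_true] at hsw
        simp only [pvLoopA, hsw, Bool.false_eq_true, if_false, ih hrest, PySem.Dict.get?,
          List.find?_cons, hbeq]

-- ===== VERDICT (by name: the statement is the Claim_ definition above) =====
theorem get_feature_description_py_spec : Claim_equal_get_feature_description_py := by
  intro name _
  unfold Spec_get_feature_description_py
  have := pv_loop_eq name pvPrefixesA.items (by decide)
  rw [get_feature_description_py, this]
  rw [get_feature_description_py_alt]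
  rcases hp : pvPartitionUnderscore name with ⟨head, sep, rest⟩
  simp only [pvKey, hp]
  rfl
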